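-- pv_equiv track=rewrite | github.com/badboj40/TDDD95 | ex1/help2.py | solve
-- ===== SOURCE A (Python) =====
-- def is_word(string):
-- 	return '<' not in string
--
-- def solve(first, second):
-- 	if len(first) != len(second): return '-'
--
-- 	for i in range(len(first)):
-- 		w1, w2 = first[i], second[i]
-- 		if w1 != w2 and is_word(w1) and is_word(w2):
-- 			return '-'
--
-- 		if not is_word(w1) and is_word(w2):
-- 			first[:] = [w if w != w1 else w2 for w in first]
-- 		elif is_word(w1) and not is_word(w2):
-- 			second[:] = [w if w != w2 else w1 for w in second]
--
-- 	for i in range(len(first)):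
-- 		w1, w2 = first[i], second[i]
-- 		if is_word(w1) != is_word(w2):
-- 			return solve(first, second)
--
-- 	return ' '.join(w if is_word(w) else 'x' for w in first)
-- ===== SOURCE B (Python) =====
-- # B: instead of rewriting both lists on every substitution (A copies the whole
-- # list each time and recurses), keep two var->word substitution environments and
-- # iterate passes over the zipped token pairs until stable; return value only --
-- # A mutates its arguments in place, B does not.
-- def is_word(string):
--     return '<' not in string
--
-- def solve(first, second):
--     if len(first) != len(second):
--         return '-'
--     pairs = list(zip(first, second))
--     e1, e2 = {}, {}
--     while True:
--         for a, b in pairs: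
--             w1 = e1.get(a, a)
--             w2 = e2.get(b, b)
--             if w1 != w2 and is_word(w1) and is_word(w2):
--                 return '-'
--             if not is_word(w1) and is_word(w2):
--                 e1[w1] = w2
--             elif is_word(w1) and not is_word(w2):
--                 e2[w2] = w1
--         if all(is_word(e1.get(a, a)) == is_word(e2.get(b, b)) for a, b in pairs):
--             return ' '.join(w if is_word(w) else 'x'
--                             for w in (e1.get(a, a) for a, b in pairs))
-- ===== Notes on version B (the rewrite author's own statement) =====
-- stated objective: alternative
-- what changed: B replaces A's repeated whole-list rewriting and self-recursion by two lazily-applied var->word substitution dictionaries and an iterated pass over the zipped token pairs until stable (return value only: A mutates its arguments in place, B does not).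
import Mathlib
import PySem

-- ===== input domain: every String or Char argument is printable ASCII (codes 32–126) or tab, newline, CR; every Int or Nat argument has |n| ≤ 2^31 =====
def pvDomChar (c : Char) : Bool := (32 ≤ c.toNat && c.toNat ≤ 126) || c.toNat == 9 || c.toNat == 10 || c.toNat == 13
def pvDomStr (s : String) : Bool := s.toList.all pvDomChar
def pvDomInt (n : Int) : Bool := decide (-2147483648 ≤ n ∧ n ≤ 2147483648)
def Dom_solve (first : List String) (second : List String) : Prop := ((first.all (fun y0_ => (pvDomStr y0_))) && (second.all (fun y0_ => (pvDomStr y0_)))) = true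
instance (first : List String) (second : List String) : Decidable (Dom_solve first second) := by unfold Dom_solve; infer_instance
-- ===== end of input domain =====

-- B keeps var->word substitution dictionaries applied lazily instead of A's repeated
-- whole-list rewriting; equivalence is about the RETURN value only (A mutates its arguments).

-- ===== PORT A =====
-- is_word: '<' not in string
def isWordP (s : String) : Bool := !(PySem.Str.isIn "<" s)

-- first loop of A: index i runs over positions, k = remaining positions; the two
-- list-comprehension rewrites become List.map; early 'return -' is the none case.
def passA : Nat → Nat → List String → List String → Option (List String × List String)
  | _, 0, f, s => some (f, s)
  | i, Nat.succ k, f, s =>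
      let w1 := f.getD i ""
      let w2 := s.getD i ""
      if w1 ≠ w2 ∧ isWordP w1 ∧ isWordP w2 then none
      else if ¬ isWordP w1 ∧ isWordP w2 then
        passA (i+1) k (f.map (fun w => if w ≠ w1 then w else w2)) s
      else if isWordP w1 ∧ ¬ isWordP w2 then
        passA (i+1) k f (s.map (fun w => if w ≠ w2 then w else w1))
      else passA (i+1) k f s

-- body of A's solve; the self-recursion is fuel-guarded (fuel only makes it total:
-- each recursive call is preceded by at least one substitution, so 2*len+2 is never exhausted)
def solveAuxA : Nat → List String → List String → String
  | 0, _, _ => "-"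
  | Nat.succ n, f, s =>
      if f.length ≠ s.length then "-"
      else
        match passA 0 f.length f s with
        | none => "-"
        | some (f', s') =>
            if (List.range f'.length).any
                (fun i => isWordP (f'.getD i "") != isWordP (s'.getD i "")) then
              solveAuxA n f' s'
            else
              PySem.Str.join " " (f'.map (fun w => if isWordP w then w else "x"))

def solve (first : List String) (second : List String) : String :=
  solveAuxA (2 * first.length + 2) first second

-- ===== PORT B =====
def appEnv (e : PySem.Dict String String) (t : String) : String := e.getD t t

-- one pass of B over the zipped pairs, updating the two environments
def passB : List (String × String) → PySem.Dict String String → PySem.Dict String String →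
    Option (PySem.Dict String String × PySem.Dict String String)
  | [], e1, e2 => some (e1, e2)
  | (a, b) :: rest, e1, e2 =>
      let w1 := appEnv e1 a
      let w2 := appEnv e2 b
      if w1 ≠ w2 ∧ isWordP w1 ∧ isWordP w2 then none
      else if ¬ isWordP w1 ∧ isWordP w2 then passB rest (e1.insert w1 w2) e2
      else if isWordP w1 ∧ ¬ isWordP w2 then passB rest e1 (e2.insert w2 w1)
      else passB rest e1 e2

-- B's while-True loop, fuel-guarded with the same never-exhausted fuel as A's recursion
def loopB : Nat → List (String × String) → PySem.Dict String String → PySem.Dict String String → String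
  | 0, _, _, _ => "-"
  | Nat.succ n, ps, e1, e2 =>
      match passB ps e1 e2 with
      | none => "-"
      | some (e1', e2') =>
          if ps.any (fun ab => isWordP (appEnv e1' ab.1) != isWordP (appEnv e2' ab.2)) then
            loopB n ps e1' e2'
          else
            PySem.Str.join " "
              (ps.map (fun ab => if isWordP (appEnv e1' ab.1) then appEnv e1' ab.1 else "x"))

def solve_alt (first : List String) (second : List String) : String :=
  if first.length ≠ second.length then "-"
  else loopB (2 * first.length + 2) (first.zip second) PySem.Dict.empty PySem.Dict.empty

-- ===== PRECONDITION & SPEC =====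
def Spec_solve (first : List String) (second : List String) (out : String) : Prop := out = solve_alt first second
instance (first : List String) (second : List String) (out : String) : Decidable (Spec_solve first second out) := by unfold Spec_solve; infer_instance

-- ===== CLAIM (what is proved, stated in full; the proofs are below) =====
def Claim_equal_solve : Prop := ∀ (first : List String) (second : List String), Dom_solve first second → Spec_solve first second (solve first second)

-- ===== LEMMAS AND PROOFS =====

-- environment invariant: every binding maps a variable to a word
def EnvInv (e : PySem.Dict String String) : Prop :=
  ∀ p ∈ e.items, isWordP p.1 = false ∧ isWordP p.2 = true

theorem envInv_empty : EnvInv PySem.Dict.empty := by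
  intro p hp
  simp [PySem.Dict.empty] at hp

theorem envInv_insert {e : PySem.Dict String String} {k v : String}
    (he : EnvInv e) (hk : isWordP k = false) (hv : isWordP v = true) :
    EnvInv (e.insert k v) := by
  intro p hp
  rw [PySem.Dict.items_insert] at hp
  by_cases hc : e.contains k = true
  · simp only [hc, if_true, List.mem_map] at hp
    obtain ⟨q, hq, hpq⟩ := hp
    by_cases hqk : (q.1 == k) = true
    · simp [hqk] at hpq; subst hpq; exact ⟨hk, hv⟩
    · simp [hqk] at hpq; subst hpq; exact he q hq
  · simp only [hc] at hp
    simp at hp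
    rcases hp with hp | hp
    · exact he p hp
    · subst hp; exact ⟨hk, hv⟩

theorem get?_mem {e : PySem.Dict String String} {k v : String}
    (h : e.get? k = some v) : (k, v) ∈ e.items := by
  unfold PySem.Dict.get? at h
  rw [Option.map_eq_some_iff] at h
  obtain ⟨p, hp, hv⟩ := h
  have hmem := List.mem_of_find?_eq_some hp
  have hpred := List.find?_some hp
  simp at hpred
  cases p
  simp_all

theorem appEnv_bound_word {e : PySem.Dict String String} {t v : String}
    (he : EnvInv e) (h : e.get? t = some v) :
    appEnv e t = v ∧ isWordP v = true := by
  refine ⟨by simp [appEnv, PySem.Dict.getD, h], (he _ (get?_mem h)).2⟩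

theorem appEnv_var_unbound {e : PySem.Dict String String} {t : String}
    (he : EnvInv e) (hv : isWordP (appEnv e t) = false) :
    appEnv e t = t ∧ e.contains t = false := by
  rcases hg : e.get? t with _ | v
  · constructor
    · simp [appEnv, PySem.Dict.getD, hg]
    · rw [PySem.Dict.contains_eq_isSome_get?, hg]; rfl
  · exfalso
    obtain ⟨h1, h2⟩ := appEnv_bound_word he hg
    rw [h1, h2] at hv
    exact absurd hv (by simp)

-- applying an extended environment = substituting in the applied value
theorem appEnv_insert_eq {e : PySem.Dict String String} {w1 w2 : String}
    (he : EnvInv e) (hw1 : isWordP w1 = false) (hnc : e.contains w1 = false) (t : String) :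
    appEnv (e.insert w1 w2) t = if appEnv e t ≠ w1 then appEnv e t else w2 := by
  have hins : appEnv (e.insert w1 w2) t = if t = w1 then w2 else appEnv e t := by
    simp only [appEnv, PySem.Dict.getD_insert]
  by_cases ht : t = w1
  · subst ht
    have h1 : appEnv e t = t := by
      simp [appEnv, PySem.Dict.getD_of_not_contains _ _ hnc]
    simp [hins, h1]
  · rw [hins, if_neg ht]
    have : appEnv e t ≠ w1 := by
      rcases hg : e.get? t with _ | v
      · have : appEnv e t = t := by simp [appEnv, PySem.Dict.getD, hg]
        rw [this]; exact ht
      · obtain ⟨h1, h2⟩ := appEnv_bound_word he hg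
        rw [h1]; intro hcontra; subst hcontra; rw [h2] at hw1; exact absurd hw1 (by simp)
    rw [if_pos this]

theorem subst_map_eq {e : PySem.Dict String String} {w1 w2 : String}
    (he : EnvInv e) (hw1 : isWordP w1 = false) (hnc : e.contains w1 = false)
    (f : List String) :
    (f.map (appEnv e)).map (fun w => if w ≠ w1 then w else w2)
      = f.map (appEnv (e.insert w1 w2)) := by
  rw [List.map_map]
  apply List.map_congr_left
  intro a _
  simp only [Function.comp]
  rw [appEnv_insert_eq he hw1 hnc a]

-- the pass correspondence: A's index loop over applied lists = B's env pass over the zip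
theorem pass_corr : ∀ (k i : Nat) (f s : List String) (e1 e2 : PySem.Dict String String),
    s.length = f.length → i + k = f.length → EnvInv e1 → EnvInv e2 →
    passA i k (f.map (appEnv e1)) (s.map (appEnv e2)) =
      Option.map (fun p => (f.map (appEnv p.1), s.map (appEnv p.2)))
        (passB ((f.zip s).drop i) e1 e2)
    ∧ ∀ e1' e2', passB ((f.zip s).drop i) e1 e2 = some (e1', e2') → EnvInv e1' ∧ EnvInv e2' := by
  intro k
  induction k with
  | zero =>
    intro i f s e1 e2 hlen hik he1 he2
    have hdrop : (f.zip s).drop i = [] := by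
      apply List.drop_eq_nil_of_le
      simp [List.length_zip]; omega
    rw [hdrop]
    simp only [passA, passB, Option.map_some]
    refine ⟨by trivial, ?_⟩
    intro e1' e2' h
    injection h with h
    injection h with h1 h2
    subst h1; subst h2
    exact ⟨he1, he2⟩
  | succ k ih =>
    intro i f s e1 e2 hlen hik he1 he2
    have hi : i < f.length := by omega
    have hi' : i < s.length := by omega
    have hiz : i < (f.zip s).length := by simp [List.length_zip]; omega
    have hdrop : (f.zip s).drop i = (f[i], s[i]) :: (f.zip s).drop (i + 1) := by
      rw [List.drop_eq_getElem_cons hiz, List.getElem_zip]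
    have hgf : (f.map (appEnv e1)).getD i "" = appEnv e1 f[i] := by
      simp [List.getD_eq_getElem?_getD, List.getElem?_eq_getElem hi]
    have hgs : (s.map (appEnv e2)).getD i "" = appEnv e2 s[i] := by
      simp [List.getD_eq_getElem?_getD, List.getElem?_eq_getElem hi']
    rw [hdrop]
    simp only [passA, passB, hgf, hgs]
    by_cases hC1 : appEnv e1 f[i] ≠ appEnv e2 s[i] ∧ isWordP (appEnv e1 f[i]) ∧ isWordP (appEnv e2 s[i])
    · rw [if_pos hC1, if_pos hC1]
      exact ⟨rfl, by intro e1' e2' h; cases h⟩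
    · rw [if_neg hC1, if_neg hC1]
      by_cases hC2 : ¬ isWordP (appEnv e1 f[i]) ∧ isWordP (appEnv e2 s[i])
      · rw [if_pos hC2, if_pos hC2]
        have hw1 : isWordP (appEnv e1 f[i]) = false := by
          cases h : isWordP (appEnv e1 f[i]) with
          | true => exact absurd h hC2.1
          | false => rfl
        obtain ⟨hub, hnc⟩ := appEnv_var_unbound he1 hw1
        have hnc' : e1.contains (appEnv e1 f[i]) = false := by rw [hub]; exact hnc
        rw [subst_map_eq he1 hw1 hnc' f]
        exact ih (i + 1) f s (e1.insert (appEnv e1 f[i]) (appEnv e2 s[i])) e2 hlen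
          (by omega) (envInv_insert he1 hw1 hC2.2) he2
      · rw [if_neg hC2, if_neg hC2]
        by_cases hC3 : isWordP (appEnv e1 f[i]) ∧ ¬ isWordP (appEnv e2 s[i])
        · rw [if_pos hC3, if_pos hC3]
          have hw2 : isWordP (appEnv e2 s[i]) = false := by
            cases h : isWordP (appEnv e2 s[i]) with
            | true => exact absurd h hC3.2
            | false => rfl
          obtain ⟨hub, hnc⟩ := appEnv_var_unbound he2 hw2
          have hnc' : e2.contains (appEnv e2 s[i]) = false := by rw [hub]; exact hnc
          rw [subst_map_eq he2 hw2 hnc' s]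
          exact ih (i + 1) f s e1 (e2.insert (appEnv e2 s[i]) (appEnv e1 f[i])) hlen
            (by omega) he1 (envInv_insert he2 hw2 hC3.1)
        · rw [if_neg hC3, if_neg hC3]
          exact ih (i + 1) f s e1 e2 hlen (by omega) he1 he2

-- A's mismatch scan over indices = a scan over the zip
theorem any_range_eq_any_zip (p : String → String → Bool) :
    ∀ (f s : List String), s.length = f.length →
    ((List.range f.length).any fun i => p (f.getD i "") (s.getD i ""))
      = (f.zip s).any (fun ab => p ab.1 ab.2) := by
  intro f s hlen
  rw [Bool.eq_iff_iff]
  simp only [List.any_eq_true, List.mem_range]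
  constructor
  · rintro ⟨i, hi, hp⟩
    refine ⟨(f[i], s[i]), ?_, ?_⟩
    · rw [← List.getElem_zip (h := by simp [List.length_zip]; omega)]
      exact List.getElem_mem _
    · simpa [List.getD_eq_getElem?_getD, List.getElem?_eq_getElem hi,
        List.getElem?_eq_getElem (show i < s.length by omega)] using hp
  · rintro ⟨ab, hab, hp⟩
    obtain ⟨i, hiz, hzi⟩ := List.mem_iff_getElem.mp hab
    have hil : i < f.length := by simp [List.length_zip] at hiz; omega
    have hil' : i < s.length := by omega
    refine ⟨i, hil, ?_⟩
    rw [List.getElem_zip] at hzi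
    simpa [List.getD_eq_getElem?_getD, List.getElem?_eq_getElem hil,
      List.getElem?_eq_getElem hil', ← hzi] using hp

-- the loop correspondence
theorem loop_corr : ∀ (n : Nat) (f s : List String) (e1 e2 : PySem.Dict String String),
    s.length = f.length → EnvInv e1 → EnvInv e2 →
    solveAuxA n (f.map (appEnv e1)) (s.map (appEnv e2)) = loopB n (f.zip s) e1 e2 := by
  intro n
  induction n with
  | zero => intro f s e1 e2 hlen he1 he2; rfl
  | succ n ih =>
    intro f s e1 e2 hlen he1 he2
    obtain ⟨hpass, hinv⟩ := pass_corr f.length 0 f s e1 e2 hlen (by omega) he1 he2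
    rw [List.drop_zero] at hpass hinv
    simp only [solveAuxA, loopB, List.length_map, hlen, if_neg (by omega : ¬ f.length ≠ f.length)]
    rw [hpass]
    cases hB : passB (f.zip s) e1 e2 with
    | none => rfl
    | some p =>
      obtain ⟨e1', e2'⟩ := p
      obtain ⟨he1', he2'⟩ := hinv e1' e2' hB
      simp only [Option.map_some]
      have hcond : ((List.range (f.map (appEnv e1')).length).any fun i =>
            isWordP ((f.map (appEnv e1')).getD i "") != isWordP ((s.map (appEnv e2')).getD i ""))
          = (f.zip s).any (fun ab => isWordP (appEnv e1' ab.1) != isWordP (appEnv e2' ab.2)) := by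
        rw [any_range_eq_any_zip (fun x y => isWordP x != isWordP y) (f.map (appEnv e1'))
          (s.map (appEnv e2')) (by simp [hlen]), List.zip_map, List.any_map]
        rfl
      rw [hcond]
      cases hc : (f.zip s).any (fun ab => isWordP (appEnv e1' ab.1) != isWordP (appEnv e2' ab.2)) with
      | true =>
        simp only [if_pos]
        exact ih f s e1' e2' hlen he1' he2'
      | false =>
        simp only [Bool.false_eq_true, if_false]
        congr 1
        rw [List.map_map]
        conv_rhs =>
          rw [show (fun ab : String × String =>
                if isWordP (appEnv e1' ab.1) = true then appEnv e1' ab.1 else "x")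
              = ((fun w => if isWordP (appEnv e1' w) = true then appEnv e1' w else "x") ∘ Prod.fst)
              from rfl,
            ← List.map_map, List.map_fst_zip (l₁ := f) (l₂ := s) (by omega)]
        rfl

theorem map_appEnv_empty (f : List String) : f.map (appEnv PySem.Dict.empty) = f := by
  rw [show f = f.map id from (List.map_id f).symm, List.map_map]
  apply List.map_congr_left
  intro a _
  simp [appEnv, PySem.Dict.getD_empty]

-- ===== VERDICT (by name: the statement is the Claim_ definition above) =====
theorem solve_spec : Claim_equal_solve := by
  intro first second _
  unfold Spec_solve solve solve_alt
  by_cases hlen : first.length = second.length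
  · rw [if_neg (by simp [hlen])]
    have := loop_corr (2 * first.length + 2) first second PySem.Dict.empty PySem.Dict.empty
      hlen.symm envInv_empty envInv_empty
    rw [map_appEnv_empty, map_appEnv_empty] at this
    exact this
  · rw [if_pos (by simp [hlen])]
    have h2 : 2 * first.length + 2 = Nat.succ (2 * first.length + 1) := rfl
    rw [h2]
    unfold solveAuxA
    rw [if_pos (by simp [hlen])]
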